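-- pv_equiv track=rewrite | github.com/Alexey-Ershov/UneexPython | homework4/spiral_digits.py | spiralDigits
-- ===== SOURCE A (Python) =====
-- def spiralDigits(M, N):
--     spiral_matrix = [['x' for i in range(M)] for j in range(N)]
--     cur_digit = 0
--     i, j = 0, 0
--     cur_direction = 'R'
--     for count in range(N * M):
--         spiral_matrix[i][j] = cur_digit
--         cur_digit = (cur_digit + 1) % 10
--
--         if cur_direction == 'R':
--             if j == M - 1 or spiral_matrix[i][j + 1] != 'x':
--                 cur_direction = 'D'
--                 i += 1
--
--             else:
--                 j += 1
--
--         elif cur_direction == 'D':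
--             if i == N - 1 or spiral_matrix[i + 1][j] != 'x':
--                 cur_direction = 'L'
--                 j -= 1
--
--             else:
--                 i += 1
--
--         elif cur_direction == 'L':
--             if j == 0 or spiral_matrix[i][j - 1] != 'x':
--                 cur_direction = 'U'
--                 i -= 1
--
--             else:
--                 j -= 1
--
--         elif cur_direction == 'U':
--             if i == 0 or spiral_matrix[i - 1][j] != 'x':
--                 cur_direction = 'R'
--                 j += 1
--
--             else:
--                 i -= 1
--
--     return spiral_matrix
-- ===== SOURCE B (Python) =====
-- def spiralDigits(M, N):
--     spiral_matrix = [[None] * M for _ in range(N)]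
--     cur_digit = 0
--     top, bot, left, right = 0, N - 1, 0, M - 1
--     while top <= bot and left <= right:
--         for j in range(left, right + 1):
--             spiral_matrix[top][j] = cur_digit
--             cur_digit = (cur_digit + 1) % 10
--         top += 1
--         for i in range(top, bot + 1):
--             spiral_matrix[i][right] = cur_digit
--             cur_digit = (cur_digit + 1) % 10
--         right -= 1
--         if top <= bot:
--             for j in range(right, left - 1, -1):
--                 spiral_matrix[bot][j] = cur_digit
--                 cur_digit = (cur_digit + 1) % 10
--             bot -= 1
--         if left <= right:
--             for i in range(bot, top - 1, -1):
--                 spiral_matrix[i][left] = cur_digit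
--                 cur_digit = (cur_digit + 1) % 10
--             left += 1
--     return spiral_matrix
-- ===== Notes on version B (the rewrite author's own statement) =====
-- stated objective: simpler
-- what changed: A walks cell by cell with a direction automaton that re-reads the matrix to decide when to turn; B fills the spiral with a boundary-shrinking while loop of four straight sweeps (top row, right column, bottom row, left column) and never reads the matrix.
import Mathlib
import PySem

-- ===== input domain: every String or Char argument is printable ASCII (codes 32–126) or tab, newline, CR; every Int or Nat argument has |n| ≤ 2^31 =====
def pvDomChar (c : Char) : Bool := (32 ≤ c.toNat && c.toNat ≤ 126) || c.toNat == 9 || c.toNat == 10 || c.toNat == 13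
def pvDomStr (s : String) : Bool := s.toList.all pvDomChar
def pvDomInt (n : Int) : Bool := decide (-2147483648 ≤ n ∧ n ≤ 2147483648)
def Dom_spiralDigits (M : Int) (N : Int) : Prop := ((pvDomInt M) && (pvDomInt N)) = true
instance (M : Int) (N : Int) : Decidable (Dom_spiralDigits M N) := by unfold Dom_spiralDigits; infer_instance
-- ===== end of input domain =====

-- B replaces A's per-cell direction automaton (which reads the matrix to decide when to
-- turn) by a boundary-shrinking loop of four straight sweeps; same return value on Pre_.

-- ===== PORT A =====
-- Cells are Option Int: `none` is Python's 'x' placeholder, `some d` a written digit.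
-- mat[i][j] = v  (indices are nonnegative and in range on every step A executes inside Pre_)
def pvSetCell (mat : List (List (Option Int))) (i j : Int) (v : Int) : List (List (Option Int)) :=
  PySem.List.pySetD mat i (PySem.List.pySetD (PySem.List.pyGetD mat i []) j (some v))

-- mat[i][j] != 'x'  (Python evaluates this only in range, after the wall test of the same branch)
def pvFilled (mat : List (List (Option Int))) (i j : Int) : Bool :=
  (((PySem.List.pyGet? mat i).bind (fun row => PySem.List.pyGet? row j)).getD none).isSome

-- one iteration of A's for-loop body: the write, then the four-way direction automaton
def pvAstep (M N : Int) (st : List (List (Option Int)) × Int × Int × Int × Char) :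
    List (List (Option Int)) × Int × Int × Int × Char :=
  match st with
  | (mat0, d0, i, j, dir) =>
    let mat := pvSetCell mat0 i j d0
    let d := PySem.Int.mod (d0 + 1) 10
    if dir = 'R' then
      if j = M - 1 ∨ pvFilled mat i (j + 1) then (mat, d, i + 1, j, 'D')
      else (mat, d, i, j + 1, 'R')
    else if dir = 'D' then
      if i = N - 1 ∨ pvFilled mat (i + 1) j then (mat, d, i, j - 1, 'L')
      else (mat, d, i + 1, j, 'D')
    else if dir = 'L' then
      if j = 0 ∨ pvFilled mat i (j - 1) then (mat, d, i - 1, j, 'U')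
      else (mat, d, i, j - 1, 'L')
    else if dir = 'U' then
      if i = 0 ∨ pvFilled mat (i - 1) j then (mat, d, i, j + 1, 'R')
      else (mat, d, i - 1, j, 'U')
    else (mat, d, i, j, dir)

def spiralDigits (M : Int) (N : Int) : List (List Int) :=
  let mat0 : List (List (Option Int)) :=
    (PySem.List.pyRange 0 N 1).map (fun _ => (PySem.List.pyRange 0 M 1).map (fun _ => (none : Option Int)))
  let fin := (PySem.List.pyRange 0 (N * M) 1).foldl (fun st _ => pvAstep M N st) (mat0, 0, 0, 0, 'R')
  -- return spiral_matrix: inside Pre_ every surviving cell was written, so getD 0 never fires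
  fin.1.map (fun row => row.map (fun c => c.getD 0))

-- ===== PORT B =====
-- for j in js: mat[i][j] = d; d = (d + 1) % 10
def pvFillRow (md : List (List (Option Int)) × Int) (i : Int) (js : List Int) :
    List (List (Option Int)) × Int :=
  js.foldl (fun p j => (pvSetCell p.1 i j p.2, PySem.Int.mod (p.2 + 1) 10)) md

-- for i in is: mat[i][j] = d; d = (d + 1) % 10
def pvFillCol (md : List (List (Option Int)) × Int) (j : Int) (is : List Int) :
    List (List (Option Int)) × Int :=
  is.foldl (fun p i => (pvSetCell p.1 i j p.2, PySem.Int.mod (p.2 + 1) 10)) md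

-- Source B's while loop; fuel only bounds the iteration count (N.toNat + M.toNat is enough)
def pvRingLoop (fuel : Nat) (top bot left right : Int) (md : List (List (Option Int)) × Int) :
    List (List (Option Int)) :=
  match fuel with
  | 0 => md.1
  | fuel + 1 =>
    if top ≤ bot ∧ left ≤ right then
      let md1 := pvFillRow md top (PySem.List.pyRange left (right + 1) 1)
      let top1 := top + 1
      let md2 := pvFillCol md1 right (PySem.List.pyRange top1 (bot + 1) 1)
      let right1 := right - 1
      let p3 := if top1 ≤ bot then
          (pvFillRow md2 bot (PySem.List.pyRange right1 (left - 1) (-1)), bot - 1)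
        else (md2, bot)
      let p4 := if left ≤ right1 then
          (pvFillCol p3.1 left (PySem.List.pyRange p3.2 (top1 - 1) (-1)), left + 1)
        else (p3.1, left)
      pvRingLoop fuel top1 p3.2 p4.2 right1 p4.1
    else md.1

def spiralDigits_alt (M : Int) (N : Int) : List (List Int) :=
  let mat0 : List (List (Option Int)) :=
    (PySem.List.pyRange 0 N 1).map (fun _ => (PySem.List.pyRange 0 M 1).map (fun _ => (none : Option Int)))
  (pvRingLoop (N.toNat + M.toNat) 0 (N - 1) 0 (M - 1) (mat0, 0)).map
    (fun row => row.map (fun c => c.getD 0))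

-- ===== PRECONDITION & SPEC =====
-- Pre_ excludes only M < 0 ∧ N < 0, where A raises IndexError (N*M > 0 but the matrix is empty).
def Pre_spiralDigits (M : Int) (N : Int) : Prop := ¬ (M < 0 ∧ N < 0)
instance (M : Int) (N : Int) : Decidable (Pre_spiralDigits M N) := by
  unfold Pre_spiralDigits; infer_instance
def pvWitness_spiralDigits : Int × Int := (4, 3)

def Spec_spiralDigits (M : Int) (N : Int) (out : List (List Int)) : Prop := out = spiralDigits_alt M N
instance (M : Int) (N : Int) (out : List (List Int)) : Decidable (Spec_spiralDigits M N out) := by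
  unfold Spec_spiralDigits; infer_instance

-- ===== CLAIM (what is proved, stated in full; the proofs are below) =====
def Claim_equal_spiralDigits : Prop := ∀ (M : Int) (N : Int), Dom_spiralDigits M N → Pre_spiralDigits M N → Spec_spiralDigits M N (spiralDigits M N)

-- ===== LEMMAS AND PROOFS =====

-- A's loop as an iterated step function
def pvArun (M N : Int) : Nat → (List (List (Option Int)) × Int × Int × Int × Char) →
    List (List (Option Int)) × Int × Int × Int × Char
  | 0, st => st
  | k + 1, st => pvArun M N k (pvAstep M N st)

-- matrix shape: N rows of length M
def pvShape (N M : Int) (mat : List (List (Option Int))) : Prop :=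
  mat.length = N.toNat ∧ ∀ row ∈ mat, row.length = M.toNat

lemma pvSetCell_eq (N M : Int) (mat : List (List (Option Int))) (i j : Int) (v : Int)
    (hs : pvShape N M mat) (hi : 0 ≤ i) (hiN : i < N) :
    ∃ h : i.toNat < mat.length,
      pvSetCell mat i j v = mat.set i.toNat (PySem.List.pySetD mat[i.toNat] j (some v)) := by
  have hlen : i.toNat < mat.length := by
    rw [hs.1]; omega
  refine ⟨hlen, ?_⟩
  unfold pvSetCell
  rw [PySem.List.pySetD_of_nonneg _ _ hi, PySem.List.pyGetD_eq_getElem _ [] hi (by omega)]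

lemma pvShape_setCell (N M : Int) (mat : List (List (Option Int))) (i j : Int) (v : Int)
    (hs : pvShape N M mat) (hi : 0 ≤ i) (hiN : i < N) :
    pvShape N M (pvSetCell mat i j v) := by
  obtain ⟨hlen, heq⟩ := pvSetCell_eq N M mat i j v hs hi hiN
  rw [heq]
  refine ⟨by simpa using hs.1, ?_⟩
  intro row hrow
  rcases List.mem_or_eq_of_mem_set hrow with h | h
  · exact hs.2 row h
  · subst h
    rw [PySem.List.length_pySetD]
    exact hs.2 _ (List.getElem_mem hlen)

lemma pvFilled_setCell_self (N M : Int) (mat : List (List (Option Int))) (i j : Int) (v : Int)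
    (hs : pvShape N M mat) (hi : 0 ≤ i) (hiN : i < N) (hj : 0 ≤ j) (hjM : j < M) :
    pvFilled (pvSetCell mat i j v) i j = true := by
  obtain ⟨hlen, heq⟩ := pvSetCell_eq N M mat i j v hs hi hiN
  have hrowlen : (mat[i.toNat]).length = M.toNat := hs.2 _ (List.getElem_mem hlen)
  have hjlen : j.toNat < (mat[i.toNat]).length := by rw [hrowlen]; omega
  rw [heq]
  unfold pvFilled
  rw [PySem.List.pyGet?_of_nonneg _ hi]
  simp [List.getElem?_set, hlen, PySem.List.pyGet?_of_nonneg _ hj,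
    PySem.List.pySetD_of_nonneg _ _ hj, hjlen]

lemma pvFilled_setCell_ne (N M : Int) (mat : List (List (Option Int))) (i j x y : Int) (v : Int)
    (hs : pvShape N M mat) (hi : 0 ≤ i) (hiN : i < N) (hj : 0 ≤ j) (hjM : j < M)
    (hx : 0 ≤ x) (hy : 0 ≤ y) (hne : x ≠ i ∨ y ≠ j) :
    pvFilled (pvSetCell mat i j v) x y = pvFilled mat x y := by
  obtain ⟨hlen, heq⟩ := pvSetCell_eq N M mat i j v hs hi hiN
  rw [heq]
  unfold pvFilled
  rw [PySem.List.pyGet?_of_nonneg _ hx, PySem.List.pyGet?_of_nonneg _ hx, List.getElem?_set]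
  by_cases hxi : i.toNat = x.toNat
  · have hxi' : x = i := by omega
    have hyj : y ≠ j := by tauto
    have hyj' : j.toNat ≠ y.toNat := by omega
    subst hxi'
    simp [List.getElem?_eq_getElem hlen, PySem.List.pySetD_of_nonneg _ _ hj,
      PySem.List.pyGet?_of_nonneg _ hy, List.getElem?_set, hyj', hlen]
  · simp [hxi]

lemma pvFillRow_cons (md : List (List (Option Int)) × Int) (i j : Int) (js : List Int) :
    pvFillRow md i (j :: js) = pvFillRow (pvSetCell md.1 i j md.2, PySem.Int.mod (md.2 + 1) 10) i js := rfl

lemma pvFillCol_cons (md : List (List (Option Int)) × Int) (j i : Int) (is : List Int) :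
    pvFillCol md j (i :: is) = pvFillCol (pvSetCell md.1 i j md.2, PySem.Int.mod (md.2 + 1) 10) j is := rfl

lemma pvFillRow_props (N M : Int) (i : Int) (js : List Int) :
    ∀ (mat : List (List (Option Int))) (d : Int), pvShape N M mat → 0 ≤ i → i < N →
    (∀ j ∈ js, 0 ≤ j ∧ j < M) →
    pvShape N M (pvFillRow (mat, d) i js).1 ∧
    (∀ x y : Int, 0 ≤ x → 0 ≤ y → y < M →
      (pvFilled (pvFillRow (mat, d) i js).1 x y = true ↔ pvFilled mat x y = true ∨ (x = i ∧ y ∈ js))) := by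
  induction js with
  | nil => intro mat d hs hi hiN _; exact ⟨hs, by simp [pvFillRow]⟩
  | cons j js ih =>
    intro mat d hs hi hiN hjs
    have hj := hjs j (by simp)
    have hs1 : pvShape N M (pvSetCell mat i j d) := pvShape_setCell N M mat i j d hs hi hiN
    rw [pvFillRow_cons]
    obtain ⟨ihs, ihf⟩ := ih (pvSetCell mat i j d) (PySem.Int.mod (d + 1) 10) hs1 hi hiN
      (fun j hm => hjs j (by simp [hm]))
    refine ⟨ihs, ?_⟩
    intro x y hx hy hyM
    rw [ihf x y hx hy hyM]
    by_cases hcase : x = i ∧ y = j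
    · obtain ⟨hx1, hy1⟩ := hcase
      subst hx1; subst hy1
      simp [pvFilled_setCell_self N M mat x y d hs hi hiN hj.1 hj.2]
    · have hne : x ≠ i ∨ y ≠ j := by tauto
      rw [pvFilled_setCell_ne N M mat i j x y d hs hi hiN hj.1 hj.2 hx hy hne]
      simp only [List.mem_cons]
      constructor
      · rintro (h | h) ; exact Or.inl h
        exact Or.inr ⟨h.1, Or.inr h.2⟩
      · rintro (h | ⟨hxi, (hyj | hmem)⟩)
        · exact Or.inl h
        · exact absurd ⟨hxi, hyj⟩ hcase
        · exact Or.inr ⟨hxi, hmem⟩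

lemma pvFillCol_props (N M : Int) (j : Int) (is : List Int) :
    ∀ (mat : List (List (Option Int))) (d : Int), pvShape N M mat → 0 ≤ j → j < M →
    (∀ i ∈ is, 0 ≤ i ∧ i < N) →
    pvShape N M (pvFillCol (mat, d) j is).1 ∧
    (∀ x y : Int, 0 ≤ x → x < N → 0 ≤ y →
      (pvFilled (pvFillCol (mat, d) j is).1 x y = true ↔ pvFilled mat x y = true ∨ (x ∈ is ∧ y = j))) := by
  induction is with
  | nil => intro mat d hs hj hjM _; exact ⟨hs, by simp [pvFillCol]⟩
  | cons i is ih =>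
    intro mat d hs hj hjM his
    have hi := his i (by simp)
    have hs1 : pvShape N M (pvSetCell mat i j d) := pvShape_setCell N M mat i j d hs hi.1 hi.2
    rw [pvFillCol_cons]
    obtain ⟨ihs, ihf⟩ := ih (pvSetCell mat i j d) (PySem.Int.mod (d + 1) 10) hs1 hj hjM
      (fun i hm => his i (by simp [hm]))
    refine ⟨ihs, ?_⟩
    intro x y hx hxN hy
    rw [ihf x y hx hxN hy]
    by_cases hcase : x = i ∧ y = j
    · obtain ⟨hx1, hy1⟩ := hcase
      subst hx1; subst hy1
      simp [pvFilled_setCell_self N M mat x y d hs hi.1 hi.2 hj hjM]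
    · have hne : x ≠ i ∨ y ≠ j := by tauto
      rw [pvFilled_setCell_ne N M mat i j x y d hs hi.1 hi.2 hj hjM hx hy hne]
      simp only [List.mem_cons]
      constructor
      · rintro (h | h) ; exact Or.inl h
        exact Or.inr ⟨Or.inr h.1, h.2⟩
      · rintro (h | ⟨(hxi | hmem), hyj⟩)
        · exact Or.inl h
        · exact absurd ⟨hxi, hyj⟩ hcase
        · exact Or.inr ⟨hmem, hyj⟩

lemma pvAstep_R (M N : Int) (mat : List (List (Option Int))) (d i j : Int) :
    pvAstep M N (mat, d, i, j, 'R') =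
      if j = M - 1 ∨ pvFilled (pvSetCell mat i j d) i (j + 1)
      then (pvSetCell mat i j d, PySem.Int.mod (d + 1) 10, i + 1, j, 'D')
      else (pvSetCell mat i j d, PySem.Int.mod (d + 1) 10, i, j + 1, 'R') := by
  simp [pvAstep]

lemma pvAstep_D (M N : Int) (mat : List (List (Option Int))) (d i j : Int) :
    pvAstep M N (mat, d, i, j, 'D') =
      if i = N - 1 ∨ pvFilled (pvSetCell mat i j d) (i + 1) j
      then (pvSetCell mat i j d, PySem.Int.mod (d + 1) 10, i, j - 1, 'L')
      else (pvSetCell mat i j d, PySem.Int.mod (d + 1) 10, i + 1, j, 'D') := by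
  simp [pvAstep]

lemma pvAstep_L (M N : Int) (mat : List (List (Option Int))) (d i j : Int) :
    pvAstep M N (mat, d, i, j, 'L') =
      if j = 0 ∨ pvFilled (pvSetCell mat i j d) i (j - 1)
      then (pvSetCell mat i j d, PySem.Int.mod (d + 1) 10, i - 1, j, 'U')
      else (pvSetCell mat i j d, PySem.Int.mod (d + 1) 10, i, j - 1, 'L') := by
  simp [pvAstep]

lemma pvAstep_U (M N : Int) (mat : List (List (Option Int))) (d i j : Int) :
    pvAstep M N (mat, d, i, j, 'U') =
      if i = 0 ∨ pvFilled (pvSetCell mat i j d) (i - 1) j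
      then (pvSetCell mat i j d, PySem.Int.mod (d + 1) 10, i, j + 1, 'R')
      else (pvSetCell mat i j d, PySem.Int.mod (d + 1) 10, i - 1, j, 'U') := by
  simp [pvAstep]

lemma pvSweepR (M N t r : Int) :
    ∀ (n : Nat) (l : Int) (mat : List (List (Option Int))) (d : Int),
    r - l = (n : Int) →
    pvShape N M mat → 0 ≤ t → t < N → 0 ≤ l → r < M →
    (∀ y, l ≤ y → y ≤ r → pvFilled mat t y = false) →
    (r = M - 1 ∨ pvFilled mat t (r + 1) = true) →
    pvArun M N (n + 1) (mat, d, t, l, 'R')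
      = ((pvFillRow (mat, d) t (PySem.List.pyRange l (r + 1) 1)).1,
         (pvFillRow (mat, d) t (PySem.List.pyRange l (r + 1) 1)).2, t + 1, r, 'D') := by
  intro n
  induction n with
  | zero =>
    intro l mat d hn hs ht htN hl hrM hunf hblock
    have hlr : l = r := by omega
    subst hlr
    show pvAstep M N (mat, d, t, l, 'R') = _
    rw [pvAstep_R]
    have hC : l = M - 1 ∨ pvFilled (pvSetCell mat t l d) t (l + 1) = true := by
      rcases hblock with h | h
      · exact Or.inl h
      · refine Or.inr ?_
        rw [pvFilled_setCell_ne N M mat t l t (l + 1) d hs ht htN hl hrM ht (by omega)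
          (Or.inr (by omega))]
        exact h
    rw [if_pos hC, PySem.List.pyRange_one_singleton]
    rfl
  | succ n ih =>
    intro l mat d hn hs ht htN hl hrM hunf hblock
    have hlr : l < r := by omega
    show pvArun M N (n + 1) (pvAstep M N (mat, d, t, l, 'R')) = _
    rw [pvAstep_R]
    have hCf : pvFilled (pvSetCell mat t l d) t (l + 1) = false := by
      rw [pvFilled_setCell_ne N M mat t l t (l + 1) d hs ht htN hl (by omega) ht (by omega)
        (Or.inr (by omega))]
      exact hunf (l + 1) (by omega) (by omega)
    have hC : ¬ (l = M - 1 ∨ pvFilled (pvSetCell mat t l d) t (l + 1) = true) := by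
      simp [hCf]; omega
    rw [if_neg hC]
    have hs1 : pvShape N M (pvSetCell mat t l d) := pvShape_setCell N M mat t l d hs ht htN
    rw [PySem.List.pyRange_one_cons (by omega : l < r + 1), pvFillRow_cons]
    refine ih (l + 1) (pvSetCell mat t l d) (PySem.Int.mod (d + 1) 10) (by omega) hs1 ht htN
      (by omega) hrM ?_ ?_
    · intro y hy1 hy2
      rw [pvFilled_setCell_ne N M mat t l t y d hs ht htN hl (by omega) ht (by omega)
        (Or.inr (by omega))]
      exact hunf y (by omega) hy2
    · rcases hblock with h | h
      · exact Or.inl h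
      · refine Or.inr ?_
        rw [pvFilled_setCell_ne N M mat t l t (r + 1) d hs ht htN hl (by omega) ht (by omega)
          (Or.inr (by omega))]
        exact h

lemma pvSweepD (M N b r : Int) :
    ∀ (n : Nat) (t : Int) (mat : List (List (Option Int))) (d : Int),
    b - t = (n : Int) →
    pvShape N M mat → 0 ≤ t → b < N → 0 ≤ r → r < M →
    (∀ x, t ≤ x → x ≤ b → pvFilled mat x r = false) →
    (b = N - 1 ∨ pvFilled mat (b + 1) r = true) →
    pvArun M N (n + 1) (mat, d, t, r, 'D')
      = ((pvFillCol (mat, d) r (PySem.List.pyRange t (b + 1) 1)).1,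
         (pvFillCol (mat, d) r (PySem.List.pyRange t (b + 1) 1)).2, b, r - 1, 'L') := by
  intro n
  induction n with
  | zero =>
    intro t mat d hn hs ht hbN hr hrM hunf hblock
    have htb : t = b := by omega
    subst htb
    show pvAstep M N (mat, d, t, r, 'D') = _
    rw [pvAstep_D]
    have hC : t = N - 1 ∨ pvFilled (pvSetCell mat t r d) (t + 1) r = true := by
      rcases hblock with h | h
      · exact Or.inl h
      · refine Or.inr ?_
        rw [pvFilled_setCell_ne N M mat t r (t + 1) r d hs ht (by omega) hr hrM (by omega) hr
          (Or.inl (by omega))]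
        exact h
    rw [if_pos hC, PySem.List.pyRange_one_singleton]
    rfl
  | succ n ih =>
    intro t mat d hn hs ht hbN hr hrM hunf hblock
    have htb : t < b := by omega
    show pvArun M N (n + 1) (pvAstep M N (mat, d, t, r, 'D')) = _
    rw [pvAstep_D]
    have hCf : pvFilled (pvSetCell mat t r d) (t + 1) r = false := by
      rw [pvFilled_setCell_ne N M mat t r (t + 1) r d hs ht (by omega) hr hrM (by omega) hr
        (Or.inl (by omega))]
      exact hunf (t + 1) (by omega) (by omega)
    have hC : ¬ (t = N - 1 ∨ pvFilled (pvSetCell mat t r d) (t + 1) r = true) := by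
      simp [hCf]; omega
    rw [if_neg hC]
    have hs1 : pvShape N M (pvSetCell mat t r d) := pvShape_setCell N M mat t r d hs ht (by omega)
    rw [PySem.List.pyRange_one_cons (by omega : t < b + 1), pvFillCol_cons]
    refine ih (t + 1) (pvSetCell mat t r d) (PySem.Int.mod (d + 1) 10) (by omega) hs1 (by omega)
      hbN hr hrM ?_ ?_
    · intro x hx1 hx2
      rw [pvFilled_setCell_ne N M mat t r x r d hs ht (by omega) hr hrM (by omega) hr
        (Or.inl (by omega))]
      exact hunf x (by omega) hx2
    · rcases hblock with h | h
      · exact Or.inl h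
      · refine Or.inr ?_
        rw [pvFilled_setCell_ne N M mat t r (b + 1) r d hs ht (by omega) hr hrM (by omega) hr
          (Or.inl (by omega))]
        exact h

lemma pvSweepL (M N b l : Int) :
    ∀ (n : Nat) (j0 : Int) (mat : List (List (Option Int))) (d : Int),
    j0 - l = (n : Int) →
    pvShape N M mat → 0 ≤ b → b < N → 0 ≤ l → j0 < M →
    (∀ y, l ≤ y → y ≤ j0 → pvFilled mat b y = false) →
    (l = 0 ∨ pvFilled mat b (l - 1) = true) →
    pvArun M N (n + 1) (mat, d, b, j0, 'L')
      = ((pvFillRow (mat, d) b (PySem.List.pyRange j0 (l - 1) (-1))).1,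
         (pvFillRow (mat, d) b (PySem.List.pyRange j0 (l - 1) (-1))).2, b - 1, l, 'U') := by
  intro n
  induction n with
  | zero =>
    intro j0 mat d hn hs hb hbN hl hj0M hunf hblock
    have hj0l : j0 = l := by omega
    subst hj0l
    show pvAstep M N (mat, d, b, j0, 'L') = _
    rw [pvAstep_L]
    have hC : j0 = 0 ∨ pvFilled (pvSetCell mat b j0 d) b (j0 - 1) = true := by
      rcases hblock with h | h
      · exact Or.inl h
      · by_cases h0 : j0 = 0
        · exact Or.inl h0
        · refine Or.inr ?_
          rw [pvFilled_setCell_ne N M mat b j0 b (j0 - 1) d hs hb hbN hl hj0M hb (by omega)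
            (Or.inr (by omega))]
          exact h
    rw [if_pos hC, PySem.List.pyRange_neg_one_cons (by omega : j0 - 1 < j0),
      PySem.List.pyRange_neg_one_eq_nil (by omega : j0 - 1 ≤ j0 - 1)]
    rfl
  | succ n ih =>
    intro j0 mat d hn hs hb hbN hl hj0M hunf hblock
    have hlj : l < j0 := by omega
    show pvArun M N (n + 1) (pvAstep M N (mat, d, b, j0, 'L')) = _
    rw [pvAstep_L]
    have hCf : pvFilled (pvSetCell mat b j0 d) b (j0 - 1) = false := by
      rw [pvFilled_setCell_ne N M mat b j0 b (j0 - 1) d hs hb hbN (by omega) hj0M hb (by omega)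
        (Or.inr (by omega))]
      exact hunf (j0 - 1) (by omega) (by omega)
    have hC : ¬ (j0 = 0 ∨ pvFilled (pvSetCell mat b j0 d) b (j0 - 1) = true) := by
      simp [hCf]; omega
    rw [if_neg hC]
    have hs1 : pvShape N M (pvSetCell mat b j0 d) := pvShape_setCell N M mat b j0 d hs hb hbN
    rw [PySem.List.pyRange_neg_one_cons (by omega : l - 1 < j0), pvFillRow_cons]
    refine ih (j0 - 1) (pvSetCell mat b j0 d) (PySem.Int.mod (d + 1) 10) (by omega) hs1 hb hbN hl
      (by omega) ?_ ?_
    · intro y hy1 hy2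
      rw [pvFilled_setCell_ne N M mat b j0 b y d hs hb hbN (by omega) hj0M hb (by omega)
        (Or.inr (by omega))]
      exact hunf y hy1 (by omega)
    · rcases hblock with h | h
      · exact Or.inl h
      · by_cases h0 : l = 0
        · exact Or.inl h0
        · refine Or.inr ?_
          rw [pvFilled_setCell_ne N M mat b j0 b (l - 1) d hs hb hbN (by omega) hj0M hb (by omega)
            (Or.inr (by omega))]
          exact h

lemma pvSweepU (M N t l : Int) :
    ∀ (n : Nat) (i0 : Int) (mat : List (List (Option Int))) (d : Int),
    i0 - t = (n : Int) →
    pvShape N M mat → 0 ≤ t → i0 < N → 0 ≤ l → l < M →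
    (∀ x, t ≤ x → x ≤ i0 → pvFilled mat x l = false) →
    (t = 0 ∨ pvFilled mat (t - 1) l = true) →
    pvArun M N (n + 1) (mat, d, i0, l, 'U')
      = ((pvFillCol (mat, d) l (PySem.List.pyRange i0 (t - 1) (-1))).1,
         (pvFillCol (mat, d) l (PySem.List.pyRange i0 (t - 1) (-1))).2, t, l + 1, 'R') := by
  intro n
  induction n with
  | zero =>
    intro i0 mat d hn hs ht hi0N hl hlM hunf hblock
    have hit : i0 = t := by omega
    subst hit
    show pvAstep M N (mat, d, i0, l, 'U') = _
    rw [pvAstep_U]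
    have hC : i0 = 0 ∨ pvFilled (pvSetCell mat i0 l d) (i0 - 1) l = true := by
      rcases hblock with h | h
      · exact Or.inl h
      · by_cases h0 : i0 = 0
        · exact Or.inl h0
        · refine Or.inr ?_
          rw [pvFilled_setCell_ne N M mat i0 l (i0 - 1) l d hs ht hi0N hl hlM (by omega) hl
            (Or.inl (by omega))]
          exact h
    rw [if_pos hC, PySem.List.pyRange_neg_one_cons (by omega : i0 - 1 < i0),
      PySem.List.pyRange_neg_one_eq_nil (by omega : i0 - 1 ≤ i0 - 1)]
    rfl
  | succ n ih =>
    intro i0 mat d hn hs ht hi0N hl hlM hunf hblock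
    have hti : t < i0 := by omega
    show pvArun M N (n + 1) (pvAstep M N (mat, d, i0, l, 'U')) = _
    rw [pvAstep_U]
    have hCf : pvFilled (pvSetCell mat i0 l d) (i0 - 1) l = false := by
      rw [pvFilled_setCell_ne N M mat i0 l (i0 - 1) l d hs (by omega) hi0N hl hlM (by omega) hl
        (Or.inl (by omega))]
      exact hunf (i0 - 1) (by omega) (by omega)
    have hC : ¬ (i0 = 0 ∨ pvFilled (pvSetCell mat i0 l d) (i0 - 1) l = true) := by
      simp [hCf]; omega
    rw [if_neg hC]
    have hs1 : pvShape N M (pvSetCell mat i0 l d) :=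
      pvShape_setCell N M mat i0 l d hs (by omega) hi0N
    rw [PySem.List.pyRange_neg_one_cons (by omega : t - 1 < i0), pvFillCol_cons]
    refine ih (i0 - 1) (pvSetCell mat i0 l d) (PySem.Int.mod (d + 1) 10) (by omega) hs1 ht
      (by omega) hl hlM ?_ ?_
    · intro x hx1 hx2
      rw [pvFilled_setCell_ne N M mat i0 l x l d hs (by omega) hi0N hl hlM (by omega) hl
        (Or.inl (by omega))]
      exact hunf x hx1 (by omega)
    · rcases hblock with h | h
      · exact Or.inl h
      · by_cases h0 : t = 0
        · exact Or.inl h0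
        · refine Or.inr ?_
          rw [pvFilled_setCell_ne N M mat i0 l (t - 1) l d hs (by omega) hi0N hl hlM (by omega) hl
            (Or.inl (by omega))]
          exact h

lemma pvFillRow_nil (md : List (List (Option Int)) × Int) (i : Int) : pvFillRow md i [] = md := rfl
lemma pvFillCol_nil (md : List (List (Option Int)) × Int) (j : Int) : pvFillCol md j [] = md := rfl

lemma pvRingLoop_stop (fuel : Nat) (top bot left right : Int) (md : List (List (Option Int)) × Int)
    (h : ¬ (top ≤ bot ∧ left ≤ right)) : pvRingLoop fuel top bot left right md = md.1 := by
  cases fuel with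
  | zero => rfl
  | succ fuel => simp only [pvRingLoop, if_neg h]

lemma pvRingLoop_succ (fuel : Nat) (top bot left right : Int) (md : List (List (Option Int)) × Int)
    (h : top ≤ bot ∧ left ≤ right) :
    pvRingLoop (fuel + 1) top bot left right md =
      (let md1 := pvFillRow md top (PySem.List.pyRange left (right + 1) 1)
       let md2 := pvFillCol md1 right (PySem.List.pyRange (top + 1) (bot + 1) 1)
       let p3 := if top + 1 ≤ bot then
           (pvFillRow md2 bot (PySem.List.pyRange (right - 1) (left - 1) (-1)), bot - 1)
         else (md2, bot)
       let p4 := if left ≤ right - 1 then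
           (pvFillCol p3.1 left (PySem.List.pyRange p3.2 (top + 1 - 1) (-1)), left + 1)
         else (p3.1, left)
       pvRingLoop fuel (top + 1) p3.2 p4.2 (right - 1) p4.1) := by
  simp only [pvRingLoop, if_pos h]

lemma pvArun_add (M N : Int) (a b : Nat) (st : List (List (Option Int)) × Int × Int × Int × Char) :
    pvArun M N (a + b) st = pvArun M N b (pvArun M N a st) := by
  induction a generalizing st with
  | zero => rw [Nat.zero_add]; rfl
  | succ a ih =>
    have : a + 1 + b = (a + b) + 1 := by omega
    rw [this]
    show pvArun M N (a + b) (pvAstep M N st) = _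
    rw [ih (pvAstep M N st)]
    rfl

lemma pvMaster (M N : Int) : ∀ (fuel : Nat) (t b l r d : Int) (mat : List (List (Option Int))),
    pvShape N M mat →
    0 ≤ t → t ≤ b → b < N → 0 ≤ l → l ≤ r → r < M →
    (∀ x y : Int, 0 ≤ x → x < N → 0 ≤ y → y < M →
      (pvFilled mat x y = true ↔ ¬ (t ≤ x ∧ x ≤ b ∧ l ≤ y ∧ y ≤ r))) →
    (b - t + 1).toNat + (r - l + 1).toNat ≤ 2 * fuel →
    (pvArun M N ((b - t + 1).toNat * (r - l + 1).toNat) (mat, d, t, l, 'R')).1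
      = pvRingLoop fuel t b l r (mat, d) := by
  intro fuel
  induction fuel with
  | zero =>
    intro t b l r d mat hs ht htb hbN hl hlr hrM hinv hfuel
    omega
  | succ fuel ih =>
    intro t b l r d mat hs ht htb hbN hl hlr hrM hinv hfuel
    rw [pvRingLoop_succ fuel t b l r (mat, d) ⟨htb, hlr⟩]
    simp only []
    -- row-t is unfilled, and blocked on the right of (t, r)
    have hunfR : ∀ y, l ≤ y → y ≤ r → pvFilled mat t y = false := by
      intro y h1 h2
      cases hF : pvFilled mat t y with
      | false => rfl
      | true => exact (((hinv t y ht (by omega) (by omega) (by omega)).mp hF)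
          ⟨le_refl t, htb, h1, h2⟩).elim
    have hblockR : r = M - 1 ∨ pvFilled mat t (r + 1) = true := by
      by_cases hrc : r = M - 1
      · exact Or.inl hrc
      · exact Or.inr ((hinv t (r + 1) ht (by omega) (by omega) (by omega)).mpr (by omega))
    by_cases hA : t = b
    · -- single row: only the top sweep writes
      subst hA
      obtain ⟨n2, hn2⟩ : ∃ n2 : Nat, r - l = (n2 : Int) := ⟨(r - l).toNat, by omega⟩
      have h1 : (t - t + 1).toNat = 1 := by omega
      have harea : (t - t + 1).toNat * (r - l + 1).toNat = n2 + 1 := by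
        rw [h1, Nat.one_mul]; omega
      rw [harea, pvSweepR M N t r n2 l mat d hn2 hs ht (by omega) hl hrM hunfR hblockR]
      have e2 : PySem.List.pyRange (t + 1) (t + 1) 1 = [] :=
        PySem.List.pyRange_one_eq_nil (by omega)
      have e3 : PySem.List.pyRange t (t + 1 - 1) (-1) = [] :=
        PySem.List.pyRange_neg_one_eq_nil (by omega)
      rw [if_neg (by omega : ¬ t + 1 ≤ t)]
      simp only [e2, e3, pvFillCol_nil]
      by_cases hc : l ≤ r - 1
      · rw [if_pos hc, pvRingLoop_stop fuel (t + 1) t (l + 1) (r - 1) _ (by rintro ⟨h', -⟩; omega)]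
      · rw [if_neg hc, pvRingLoop_stop fuel (t + 1) t l (r - 1) _ (by rintro ⟨h', -⟩; omega)]
    · have htb' : t < b := by omega
      by_cases hB : l = r
      · -- single column: top sweep degenerates to one cell, then the down sweep
        subst hB
        obtain ⟨a, ha⟩ : ∃ a : Nat, b - t = (a : Int) + 1 := ⟨(b - t - 1).toNat, by omega⟩
        have h2 : (l - l + 1).toNat = 1 := by omega
        have harea : (b - t + 1).toNat * (l - l + 1).toNat = (0 + 1) + (a + 1) := by
          rw [h2, Nat.mul_one]; omega
        rw [harea, pvArun_add M N (0 + 1),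
          pvSweepR M N t l 0 l mat d (by omega) hs ht (by omega) hl hrM hunfR hblockR]
        obtain ⟨hs1, hf1⟩ := pvFillRow_props N M t (PySem.List.pyRange l (l + 1) 1) mat d hs ht
          (by omega) (fun j hj => by rw [PySem.List.mem_pyRange_one] at hj; exact ⟨by omega, by omega⟩)
        have hunfD : ∀ x, t + 1 ≤ x → x ≤ b →
            pvFilled (pvFillRow (mat, d) t (PySem.List.pyRange l (l + 1) 1)).1 x l = false := by
          intro x hx1 hx2
          cases hF : pvFilled (pvFillRow (mat, d) t (PySem.List.pyRange l (l + 1) 1)).1 x l with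
          | false => rfl
          | true =>
            rcases (hf1 x l (by omega) hl (by omega)).mp hF with h | h
            · exact (((hinv x l (by omega) (by omega) hl (by omega)).mp h)
                ⟨by omega, by omega, le_refl l, le_refl l⟩).elim
            · exact absurd h.1 (by omega)
        have hblockD : b = N - 1 ∨
            pvFilled (pvFillRow (mat, d) t (PySem.List.pyRange l (l + 1) 1)).1 (b + 1) l = true := by
          by_cases hbc : b = N - 1
          · exact Or.inl hbc
          · exact Or.inr ((hf1 (b + 1) l (by omega) hl (by omega)).mpr
              (Or.inl ((hinv (b + 1) l (by omega) (by omega) hl (by omega)).mpr (by omega))))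
        rw [pvSweepD M N b l a (t + 1) _ _ (by omega) hs1 (by omega) hbN hl hrM hunfD hblockD]
        rw [if_pos (by omega : t + 1 ≤ b),
          PySem.List.pyRange_neg_one_eq_nil (by omega : l - 1 ≤ l - 1), pvFillRow_nil]
        rw [if_neg (by omega : ¬ l ≤ l - 1)]
        rw [pvRingLoop_stop fuel (t + 1) (b - 1) l (l - 1) _ (by rintro ⟨-, h'⟩; omega)]
      · -- a proper ring: the four sweeps, then (possibly) the inner rectangle
        have hlr' : l < r := by omega
        obtain ⟨a, ha⟩ : ∃ a : Nat, b - t = (a : Int) + 1 := ⟨(b - t - 1).toNat, by omega⟩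
        obtain ⟨c, hc⟩ : ∃ c : Nat, r - l = (c : Int) + 1 := ⟨(r - l - 1).toNat, by omega⟩
        have harea : (b - t + 1).toNat * (r - l + 1).toNat
            = c + 1 + 1 + (a + 1 + (c + 1 + (a + a * c))) := by
          rw [show (b - t + 1).toNat = a + 2 by omega, show (r - l + 1).toNat = c + 2 by omega]
          ring
        rw [harea, pvArun_add M N (c + 1 + 1),
          pvSweepR M N t r (c + 1) l mat d (by omega) hs ht (by omega) hl hrM hunfR hblockR,
          pvArun_add M N (a + 1)]
        obtain ⟨hs1, hf1⟩ := pvFillRow_props N M t (PySem.List.pyRange l (r + 1) 1) mat d hs ht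
          (by omega) (fun j hj => by rw [PySem.List.mem_pyRange_one] at hj; exact ⟨by omega, by omega⟩)
        have hunfD : ∀ x, t + 1 ≤ x → x ≤ b →
            pvFilled (pvFillRow (mat, d) t (PySem.List.pyRange l (r + 1) 1)).1 x r = false := by
          intro x hx1 hx2
          cases hF : pvFilled (pvFillRow (mat, d) t (PySem.List.pyRange l (r + 1) 1)).1 x r with
          | false => rfl
          | true =>
            rcases (hf1 x r (by omega) (by omega) hrM).mp hF with h | h
            · exact (((hinv x r (by omega) (by omega) (by omega) hrM).mp h)
                ⟨by omega, by omega, by omega, le_refl r⟩).elim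
            · exact absurd h.1 (by omega)
        have hblockD : b = N - 1 ∨
            pvFilled (pvFillRow (mat, d) t (PySem.List.pyRange l (r + 1) 1)).1 (b + 1) r = true := by
          by_cases hbc : b = N - 1
          · exact Or.inl hbc
          · exact Or.inr ((hf1 (b + 1) r (by omega) (by omega) hrM).mpr
              (Or.inl ((hinv (b + 1) r (by omega) (by omega) (by omega) hrM).mpr (by omega))))
        rw [pvSweepD M N b r a (t + 1) _ _ (by omega) hs1 (by omega) hbN (by omega) hrM hunfD hblockD,
          Prod.mk.eta, pvArun_add M N (c + 1)]
        obtain ⟨hs2, hf2⟩ := pvFillCol_props N M r (PySem.List.pyRange (t + 1) (b + 1) 1)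
          (pvFillRow (mat, d) t (PySem.List.pyRange l (r + 1) 1)).1
          (pvFillRow (mat, d) t (PySem.List.pyRange l (r + 1) 1)).2 hs1 (by omega) hrM
          (fun i hi => by rw [PySem.List.mem_pyRange_one] at hi; exact ⟨by omega, by omega⟩)
        have hunfL : ∀ y, l ≤ y → y ≤ r - 1 → pvFilled (pvFillCol
            (pvFillRow (mat, d) t (PySem.List.pyRange l (r + 1) 1)) r
            (PySem.List.pyRange (t + 1) (b + 1) 1)).1 b y = false := by
          intro y hy1 hy2
          cases hF : pvFilled (pvFillCol (pvFillRow (mat, d) t (PySem.List.pyRange l (r + 1) 1)) r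
              (PySem.List.pyRange (t + 1) (b + 1) 1)).1 b y with
          | false => rfl
          | true =>
            rcases (hf2 b y (by omega) hbN (by omega)).mp hF with h | h
            · rcases (hf1 b y (by omega) (by omega) (by omega)).mp h with h' | h'
              · exact (((hinv b y (by omega) hbN (by omega) (by omega)).mp h')
                  ⟨htb, le_refl b, hy1, by omega⟩).elim
              · exact absurd h'.1 (by omega)
            · exact absurd h.2 (by omega)
        have hblockL : l = 0 ∨ pvFilled (pvFillCol
            (pvFillRow (mat, d) t (PySem.List.pyRange l (r + 1) 1)) r
            (PySem.List.pyRange (t + 1) (b + 1) 1)).1 b (l - 1) = true := by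
          by_cases hlc : l = 0
          · exact Or.inl hlc
          · exact Or.inr ((hf2 b (l - 1) (by omega) hbN (by omega)).mpr (Or.inl
              ((hf1 b (l - 1) (by omega) (by omega) (by omega)).mpr (Or.inl
                ((hinv b (l - 1) (by omega) hbN (by omega) (by omega)).mpr (by omega))))))
        rw [pvSweepL M N b l c (r - 1) _ _ (by omega) hs2 (by omega) hbN hl (by omega) hunfL hblockL,
          Prod.mk.eta]
        obtain ⟨hs3, hf3⟩ := pvFillRow_props N M b (PySem.List.pyRange (r - 1) (l - 1) (-1))
          (pvFillCol (pvFillRow (mat, d) t (PySem.List.pyRange l (r + 1) 1)) r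
            (PySem.List.pyRange (t + 1) (b + 1) 1)).1
          (pvFillCol (pvFillRow (mat, d) t (PySem.List.pyRange l (r + 1) 1)) r
            (PySem.List.pyRange (t + 1) (b + 1) 1)).2 hs2 (by omega) hbN
          (fun j hj => by rw [PySem.List.mem_pyRange_neg_one] at hj; exact ⟨by omega, by omega⟩)
        rcases Nat.eq_zero_or_pos a with ha0 | ha1
        · -- lowest ring is two rows high: no up sweep, and the loop stops afterwards
          subst ha0
          rw [show (0 : Nat) + 0 * c = 0 by omega]
          rw [if_pos (by omega : t + 1 ≤ b), if_pos (by omega : l ≤ r - 1)]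
          rw [PySem.List.pyRange_neg_one_eq_nil (by omega : b - 1 ≤ t + 1 - 1), pvFillCol_nil]
          rw [pvRingLoop_stop fuel (t + 1) (b - 1) (l + 1) (r - 1) _ (by rintro ⟨h', -⟩; omega)]
          rfl
        · obtain ⟨e, rfl⟩ : ∃ e : Nat, a = e + 1 := ⟨a - 1, by omega⟩
          rw [pvArun_add M N (e + 1)]
          have hunfU : ∀ x, t + 1 ≤ x → x ≤ b - 1 → pvFilled (pvFillRow
              (pvFillCol (pvFillRow (mat, d) t (PySem.List.pyRange l (r + 1) 1)) r
                (PySem.List.pyRange (t + 1) (b + 1) 1)) b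
              (PySem.List.pyRange (r - 1) (l - 1) (-1))).1 x l = false := by
            intro x hx1 hx2
            cases hF : pvFilled (pvFillRow
                (pvFillCol (pvFillRow (mat, d) t (PySem.List.pyRange l (r + 1) 1)) r
                  (PySem.List.pyRange (t + 1) (b + 1) 1)) b
                (PySem.List.pyRange (r - 1) (l - 1) (-1))).1 x l with
            | false => rfl
            | true =>
              rcases (hf3 x l (by omega) hl (by omega)).mp hF with h | h
              · rcases (hf2 x l (by omega) (by omega) hl).mp h with h' | h'
                · rcases (hf1 x l (by omega) hl (by omega)).mp h' with h'' | h''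
                  · exact (((hinv x l (by omega) (by omega) hl (by omega)).mp h'')
                      ⟨by omega, by omega, le_refl l, by omega⟩).elim
                  · exact absurd h''.1 (by omega)
                · exact absurd h'.2 (by omega)
              · exact absurd h.1 (by omega)
          have hblockU : t + 1 = 0 ∨ pvFilled (pvFillRow
              (pvFillCol (pvFillRow (mat, d) t (PySem.List.pyRange l (r + 1) 1)) r
                (PySem.List.pyRange (t + 1) (b + 1) 1)) b
              (PySem.List.pyRange (r - 1) (l - 1) (-1))).1 (t + 1 - 1) l = true := by
            rw [show t + 1 - 1 = t from by omega]
            refine Or.inr ((hf3 t l ht hl (by omega)).mpr (Or.inl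
              ((hf2 t l ht (by omega) hl).mpr (Or.inl
                ((hf1 t l ht hl (by omega)).mpr (Or.inr ⟨rfl, ?_⟩))))))
            rw [PySem.List.mem_pyRange_one]
            exact ⟨le_refl l, by omega⟩
          rw [pvSweepU M N (t + 1) l e (b - 1) _ _ (by omega) hs3 (by omega) (by omega) hl (by omega)
            hunfU hblockU]
          simp only [Prod.mk.eta]
          rw [if_pos (by omega : t + 1 ≤ b), if_pos (by omega : l ≤ r - 1)]
          rcases Nat.eq_zero_or_pos c with hc0 | hc1
          · -- width-2 ring: nothing left inside
            subst hc0
            rw [show (e + 1) * 0 = 0 from by omega]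
            rw [pvRingLoop_stop fuel (t + 1) (b - 1) (l + 1) (r - 1) _ (by rintro ⟨-, h'⟩; omega)]
            rfl
          · obtain ⟨f, rfl⟩ : ∃ f : Nat, c = f + 1 := ⟨c - 1, by omega⟩
            have hi1 : (b - 1 - (t + 1) + 1).toNat = e + 1 := by omega
            have hi2 : (r - 1 - (l + 1) + 1).toNat = f + 1 := by omega
            obtain ⟨hs4, hf4⟩ := pvFillCol_props N M l
              (PySem.List.pyRange (b - 1) (t + 1 - 1) (-1))
              (pvFillRow (pvFillCol (pvFillRow (mat, d) t (PySem.List.pyRange l (r + 1) 1)) r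
                (PySem.List.pyRange (t + 1) (b + 1) 1)) b
                (PySem.List.pyRange (r - 1) (l - 1) (-1))).1
              (pvFillRow (pvFillCol (pvFillRow (mat, d) t (PySem.List.pyRange l (r + 1) 1)) r
                (PySem.List.pyRange (t + 1) (b + 1) 1)) b
                (PySem.List.pyRange (r - 1) (l - 1) (-1))).2 hs3 hl (by omega)
              (fun i hi => by rw [PySem.List.mem_pyRange_neg_one] at hi; exact ⟨by omega, by omega⟩)
            have hinv4 : ∀ x y : Int, 0 ≤ x → x < N → 0 ≤ y → y < M →
                (pvFilled (pvFillCol (pvFillRow (pvFillCol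
                    (pvFillRow (mat, d) t (PySem.List.pyRange l (r + 1) 1)) r
                    (PySem.List.pyRange (t + 1) (b + 1) 1)) b
                    (PySem.List.pyRange (r - 1) (l - 1) (-1))) l
                    (PySem.List.pyRange (b - 1) (t + 1 - 1) (-1))).1 x y = true ↔
                  ¬ (t + 1 ≤ x ∧ x ≤ b - 1 ∧ l + 1 ≤ y ∧ y ≤ r - 1)) := by
              intro x y hx hxN hy hyM
              constructor
              · intro hF
                rcases (hf4 x y hx hxN hy).mp hF with h | h
                · rcases (hf3 x y hx hy hyM).mp h with h' | h'
                  · rcases (hf2 x y hx hxN hy).mp h' with h'' | h''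
                    · rcases (hf1 x y hx hy hyM).mp h'' with h3 | h3
                      · have := (hinv x y hx hxN hy hyM).mp h3
                        omega
                      · obtain ⟨hxt, -⟩ := h3
                        omega
                    · obtain ⟨hm, hyr⟩ := h''
                      rw [PySem.List.mem_pyRange_one] at hm
                      omega
                  · obtain ⟨hxb, hm⟩ := h'
                    rw [PySem.List.mem_pyRange_neg_one] at hm
                    omega
                · obtain ⟨hm, hyl⟩ := h
                  rw [PySem.List.mem_pyRange_neg_one] at hm
                  omega
              · intro hOut
                by_cases h1 : t ≤ x ∧ x ≤ b ∧ l ≤ y ∧ y ≤ r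
                · by_cases hxt : x = t
                  · exact (hf4 x y hx hxN hy).mpr (Or.inl ((hf3 x y hx hy hyM).mpr (Or.inl
                      ((hf2 x y hx hxN hy).mpr (Or.inl ((hf1 x y hx hy hyM).mpr
                        (Or.inr ⟨hxt, by rw [PySem.List.mem_pyRange_one]; omega⟩)))))))
                  · by_cases hyr : y = r
                    · exact (hf4 x y hx hxN hy).mpr (Or.inl ((hf3 x y hx hy hyM).mpr (Or.inl
                        ((hf2 x y hx hxN hy).mpr
                          (Or.inr ⟨by rw [PySem.List.mem_pyRange_one]; omega, hyr⟩)))))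
                    · by_cases hxb : x = b
                      · exact (hf4 x y hx hxN hy).mpr (Or.inl ((hf3 x y hx hy hyM).mpr
                          (Or.inr ⟨hxb, by rw [PySem.List.mem_pyRange_neg_one]; omega⟩)))
                      · exact (hf4 x y hx hxN hy).mpr
                          (Or.inr ⟨by rw [PySem.List.mem_pyRange_neg_one]; omega, by omega⟩)
                · exact (hf4 x y hx hxN hy).mpr (Or.inl ((hf3 x y hx hy hyM).mpr (Or.inl
                    ((hf2 x y hx hxN hy).mpr (Or.inl ((hf1 x y hx hy hyM).mpr
                      (Or.inl ((hinv x y hx hxN hy hyM).mpr h1))))))))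
            have H := ih (t + 1) (b - 1) (l + 1) (r - 1)
              (pvFillCol (pvFillRow (pvFillCol
                (pvFillRow (mat, d) t (PySem.List.pyRange l (r + 1) 1)) r
                (PySem.List.pyRange (t + 1) (b + 1) 1)) b
                (PySem.List.pyRange (r - 1) (l - 1) (-1))) l
                (PySem.List.pyRange (b - 1) (t + 1 - 1) (-1))).2
              (pvFillCol (pvFillRow (pvFillCol
                (pvFillRow (mat, d) t (PySem.List.pyRange l (r + 1) 1)) r
                (PySem.List.pyRange (t + 1) (b + 1) 1)) b
                (PySem.List.pyRange (r - 1) (l - 1) (-1))) l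
                (PySem.List.pyRange (b - 1) (t + 1 - 1) (-1))).1
              hs4 (by omega) (by omega) (by omega) (by omega) (by omega) (by omega) hinv4
              (by omega)
            rw [hi1, hi2] at H
            exact H

lemma pvFoldl_eq_arun (M N : Int) (l : List Int) (st : List (List (Option Int)) × Int × Int × Int × Char) :
    l.foldl (fun st _ => pvAstep M N st) st = pvArun M N l.length st := by
  induction l generalizing st with
  | nil => rfl
  | cons x xs ih => simpa [pvArun] using ih (pvAstep M N st)



theorem spiralDigits_eq (M N : Int) (hpre : ¬ (M < 0 ∧ N < 0)) :
    spiralDigits M N = spiralDigits_alt M N := by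
  simp only [spiralDigits, spiralDigits_alt]
  have hmain : ((PySem.List.pyRange 0 (N * M) 1).foldl (fun st _ => pvAstep M N st)
      ((PySem.List.pyRange 0 N 1).map
        (fun _ => (PySem.List.pyRange 0 M 1).map (fun _ => (none : Option Int))), 0, 0, 0, 'R')).1
      = pvRingLoop (N.toNat + M.toNat) 0 (N - 1) 0 (M - 1)
        ((PySem.List.pyRange 0 N 1).map
          (fun _ => (PySem.List.pyRange 0 M 1).map (fun _ => (none : Option Int))), 0) := by
    rw [pvFoldl_eq_arun, PySem.List.length_pyRange_one]
    by_cases hMN : 0 < M ∧ 0 < N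
    · obtain ⟨hM, hN⟩ := hMN
      have hshape : pvShape N M ((PySem.List.pyRange 0 N 1).map
          (fun _ => (PySem.List.pyRange 0 M 1).map (fun _ => (none : Option Int)))) := by
        constructor
        · rw [List.length_map, PySem.List.length_pyRange_one]
          omega
        · intro row hrow
          rw [List.mem_map] at hrow
          obtain ⟨z, -, rfl⟩ := hrow
          rw [List.length_map, PySem.List.length_pyRange_one]
          omega
      have hf0 : ∀ x y : Int, pvFilled ((PySem.List.pyRange 0 N 1).map
          (fun _ => (PySem.List.pyRange 0 M 1).map (fun _ => (none : Option Int)))) x y = false := by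
        intro x y
        cases hgx : PySem.List.pyGet? ((PySem.List.pyRange 0 N 1).map
            (fun _ => (PySem.List.pyRange 0 M 1).map (fun _ => (none : Option Int)))) x with
        | none => unfold pvFilled; rw [hgx]; rfl
        | some row =>
          have hrow : row ∈ _ := PySem.List.mem_of_pyGet?_eq_some _ hgx
          rw [List.mem_map] at hrow
          obtain ⟨z, -, rfl⟩ := hrow
          cases hgy : PySem.List.pyGet?
              ((PySem.List.pyRange 0 M 1).map (fun _ => (none : Option Int))) y with
          | none => unfold pvFilled; rw [hgx, Option.bind_some, hgy]; rfl
          | some c =>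
            have hcm : c ∈ _ := PySem.List.mem_of_pyGet?_eq_some _ hgy
            rw [List.mem_map] at hcm
            obtain ⟨w, -, rfl⟩ := hcm
            unfold pvFilled; rw [hgx, Option.bind_some, hgy]; rfl
      have hinv0 : ∀ x y : Int, 0 ≤ x → x < N → 0 ≤ y → y < M →
          (pvFilled ((PySem.List.pyRange 0 N 1).map
            (fun _ => (PySem.List.pyRange 0 M 1).map (fun _ => (none : Option Int)))) x y = true ↔
            ¬ (0 ≤ x ∧ x ≤ N - 1 ∧ 0 ≤ y ∧ y ≤ M - 1)) := by
        intro x y hx hxN hy hyM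
        rw [hf0 x y]
        simp only [Bool.false_eq_true, false_iff, not_not]
        omega
      have hK : (N * M - 0).toNat = (N - 1 - 0 + 1).toNat * (M - 1 - 0 + 1).toNat := by
        obtain ⟨n, rfl⟩ : ∃ n : Nat, N = (n : Int) := ⟨N.toNat, by omega⟩
        obtain ⟨m, rfl⟩ : ∃ m : Nat, M = (m : Int) := ⟨M.toNat, by omega⟩
        rw [show ((n : Int) - 1 - 0 + 1).toNat = n from by omega,
          show ((m : Int) - 1 - 0 + 1).toNat = m from by omega,
          show (n : Int) * m - 0 = ((n * m : Nat) : Int) from by push_cast; ring]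
        omega
      rw [hK]
      exact pvMaster M N (N.toNat + M.toNat) 0 (N - 1) 0 (M - 1) 0 _ hshape (le_refl 0)
        (by omega) (by omega) (le_refl 0) (by omega) (by omega) hinv0 (by omega)
    · have hNM : N * M ≤ 0 := by
        have hsplit : N ≤ 0 ∨ M ≤ 0 := by omega
        rcases hsplit with h | h
        · have : 0 ≤ M ∨ N = 0 := by omega
          rcases this with h2 | h2
          · exact mul_nonpos_iff.mpr (Or.inr ⟨h, h2⟩)
          · simp [h2]
        · have : 0 ≤ N ∨ M = 0 := by omega
          rcases this with h2 | h2
          · exact mul_nonpos_iff.mpr (Or.inl ⟨h2, h⟩)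
          · simp [h2]
      rw [show (N * M - 0).toNat = 0 from by omega]
      rw [pvRingLoop_stop _ _ _ _ _ _ (by rintro ⟨h1, h2⟩; omega)]
      rfl
  rw [hmain]

-- ===== VERDICT (by name: the statement is the Claim_ definition above) =====
theorem spiralDigits_spec : Claim_equal_spiralDigits := by
  intro M N _ hpre
  exact spiralDigits_eq M N hpre
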